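-- pv_equiv track=rewrite | github.com/TaoDFang/bionemo-framework | main/recipes/recipes/codonfm_native_te/tokenizer.py | tokenize
-- ===== SOURCE A (Python) =====
-- def tokenize(sequence: str) -> list[str]:
--     """Split a DNA/RNA sequence into codon tokens.
--
--     Args:
--         sequence: Raw DNA/RNA string (length must be divisible by 3).
--
--     Returns:
--         List of codon token strings.
--     """
--     sequence = sequence.upper()
--     tokens = []
--     for i in range(0, len(sequence) - 2, 3):
--         codon = sequence[i : i + 3]
--         if len(codon) == 3:
--             tokens.append(codon)
--     return tokens
-- ===== SOURCE B (Python) =====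
-- def tokenize(sequence: str) -> list[str]:
--     """Split a DNA/RNA sequence into codon tokens (iterator-grouping idiom)."""
--     it = iter(sequence.upper())
--     return ["".join(codon) for codon in zip(it, it, it)]
-- ===== Notes on version B (the rewrite author's own statement) =====
-- stated objective: idiomatic
-- what changed: Replaces the explicit index loop with stride-3 slicing by the standard iterator-grouping idiom zip(it, it, it) over a single iterator, joining each 3-tuple; zip's truncation drops a trailing 1- or 2-char remainder exactly as A does.
import Mathlib
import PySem

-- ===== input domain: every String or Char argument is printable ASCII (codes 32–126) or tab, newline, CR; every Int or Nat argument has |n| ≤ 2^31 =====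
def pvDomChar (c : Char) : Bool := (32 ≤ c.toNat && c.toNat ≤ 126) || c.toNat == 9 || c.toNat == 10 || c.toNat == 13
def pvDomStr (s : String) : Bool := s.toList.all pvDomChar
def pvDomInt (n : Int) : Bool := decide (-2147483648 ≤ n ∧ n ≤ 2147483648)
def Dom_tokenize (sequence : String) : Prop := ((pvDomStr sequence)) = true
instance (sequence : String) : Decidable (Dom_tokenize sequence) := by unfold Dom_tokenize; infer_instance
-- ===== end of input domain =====

-- B replaces A's index/slice loop with the iterator-grouping idiom (zip of three
-- copies of one iterator), consuming the uppercased characters three at a time.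

-- ===== PORT A =====
-- for i in range(0, len(sequence) - 2, 3): codon = sequence[i:i+3]; if len(codon) == 3: append
def tokenize (sequence : String) : List String :=
  let s := PySem.Str.upper sequence
  (PySem.List.pyRange 0 (PySem.Str.len s - 2) 3).foldl
    (fun tokens i =>
      let codon := PySem.Str.slice s (some i) (some (i + 3))
      if PySem.Str.len codon = 3 then tokens ++ [codon] else tokens)
    []

-- ===== PORT B =====
-- zip(it, it, it) over one iterator: consume three characters at a time, join each triple
def tokenizeChunk3 : List Char → List String
  | a :: b :: c :: rest => String.ofList [a, b, c] :: tokenizeChunk3 rest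
  | _ => []

def tokenize_alt (sequence : String) : List String :=
  tokenizeChunk3 (PySem.Str.upper sequence).toList

-- ===== PRECONDITION & SPEC =====
def Spec_tokenize (sequence : String) (out : List String) : Prop := out = tokenize_alt sequence
instance (sequence : String) (out : List String) : Decidable (Spec_tokenize sequence out) := by unfold Spec_tokenize; infer_instance

-- ===== CLAIM (what is proved, stated in full; the proofs are below) =====
def Claim_equal_tokenize : Prop := ∀ (sequence : String), Dom_tokenize sequence → Spec_tokenize sequence (tokenize sequence)

-- ===== LEMMAS AND PROOFS =====

-- step-3 range is empty when the stop bound is ≤ 0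
lemma pyRange3_nil {b : Int} (h : b ≤ 0) : PySem.List.pyRange 0 b 3 = [] := by
  rw [PySem.List.pyRange_of_pos 0 b (by norm_num : (0:Int) < 3)]
  simp [show ¬ ((0:Int) < b) by omega]

-- cons form of the step-3 range starting at 0, with the tail re-based at 0
lemma pyRange3_cons {b : Int} (h : 0 < b) :
    PySem.List.pyRange 0 b 3 = 0 :: (PySem.List.pyRange 0 (b - 3) 3).map (· + 3) := by
  rw [PySem.List.pyRange_of_pos 0 b (by norm_num : (0:Int) < 3),
      PySem.List.pyRange_of_pos 0 (b - 3) (by norm_num : (0:Int) < 3)]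
  by_cases h3 : (3:Int) < b
  · have hb : ((b - 0 + 3 - 1) / 3).toNat = ((b - 3 - 0 + 3 - 1) / 3).toNat + 1 := by omega
    rw [if_pos h, if_pos (by omega : (0:Int) < b - 3), hb, List.range_succ_eq_map]
    simp only [List.map_cons, List.map_map]
    refine congrArg₂ List.cons (by norm_num) ?_
    apply List.map_congr_left
    intro k _
    simp only [Function.comp_apply]
    push_cast
    ring
  · have hb : ((b - 0 + 3 - 1) / 3).toNat = 1 := by omega
    rw [if_pos h, if_neg (by omega : ¬ (0:Int) < b - 3), hb]
    simp

-- the slice sequence[i:i+3] for a nonnegative i, as drop/take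
lemma slice3 (cs : List Char) (i : Int) (hi : 0 ≤ i) :
    PySem.List.slice cs (some i) (some (i + 3)) = (cs.drop i.toNat).take 3 := by
  rw [PySem.List.slice_toNat cs hi (by omega)]
  congr 1
  omega

-- the loop body of A, at the List Char level
def tokStep (cs : List Char) (tokens : List String) (i : Int) : List String :=
  let codon := PySem.List.slice cs (some i) (some (i + 3))
  if (codon.length : Int) = 3 then tokens ++ [String.ofList codon] else tokens

-- A's fold over the step-3 range equals B's three-at-a-time recursion
lemma fold_eq_chunk3 (cs : List Char) : ∀ (acc : List String),
    (PySem.List.pyRange 0 ((cs.length : Int) - 2) 3).foldl (tokStep cs) acc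
      = acc ++ tokenizeChunk3 cs := by
  induction cs using tokenizeChunk3.induct with
  | case1 a b c rest ih =>
    intro acc
    have hlen : ((a :: b :: c :: rest).length : Int) - 2 = (rest.length : Int) + 1 := by
      simp
      omega
    have hstep : tokStep (a :: b :: c :: rest) acc 0 = acc ++ [String.ofList [a, b, c]] := by
      unfold tokStep
      rw [slice3 _ 0 (le_refl 0)]
      simp
    have hbnd : (rest.length : Int) + 1 - 3 = (rest.length : Int) - 2 := by ring
    have hcong : ∀ (acc' : List String), ∀ i ∈ PySem.List.pyRange 0 ((rest.length : Int) - 2) 3,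
        (fun x y => tokStep (a :: b :: c :: rest) x (y + 3)) acc' i = tokStep rest acc' i := by
      intro acc' i hi
      have hi0 : 0 ≤ i :=
        ((PySem.List.mem_pyRange_iff_of_pos (by norm_num : (0:Int) < 3) i).mp hi).1
      have hdrop : (a :: b :: c :: rest).drop (i + 3).toNat = rest.drop i.toNat := by
        have h3 : (i + 3).toNat = i.toNat + 3 := by omega
        simp [h3]
      simp only [tokStep]
      rw [slice3 _ _ (by omega), slice3 _ _ hi0, hdrop]
    rw [hlen, pyRange3_cons (by omega), List.foldl_cons, List.foldl_map, hstep, hbnd,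
        PySem.List.foldl_congr_mem _ _ (tokStep rest) _ hcong, ih]
    simp [tokenizeChunk3]
  | case2 cs h =>
    intro acc
    rcases cs with _ | ⟨a, _ | ⟨b, _ | ⟨c, rest⟩⟩⟩
    · rw [pyRange3_nil (by norm_num)]
      simp [tokenizeChunk3]
    · rw [pyRange3_nil (by norm_num)]
      simp [tokenizeChunk3]
    · rw [pyRange3_nil (by norm_num)]
      simp [tokenizeChunk3]
    · exact (h a b c rest rfl).elim

-- ===== VERDICT (by name: the statement is the Claim_ definition above) =====
theorem tokenize_spec : Claim_equal_tokenize := by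
  intro sequence _
  unfold Spec_tokenize tokenize tokenize_alt
  show (PySem.List.pyRange 0 (PySem.Str.len (PySem.Str.upper sequence) - 2) 3).foldl
      (fun tokens i =>
        let codon := PySem.Str.slice (PySem.Str.upper sequence) (some i) (some (i + 3))
        if PySem.Str.len codon = 3 then tokens ++ [codon] else tokens) []
    = tokenizeChunk3 (PySem.Str.upper sequence).toList
  have hpt : ∀ (acc : List String),
      ∀ i ∈ PySem.List.pyRange 0 (PySem.Str.len (PySem.Str.upper sequence) - 2) 3,
      (fun (tokens : List String) (i : Int) =>
        let codon := PySem.Str.slice (PySem.Str.upper sequence) (some i) (some (i + 3))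
        if PySem.Str.len codon = 3 then tokens ++ [codon] else tokens) acc i
        = tokStep (PySem.Str.upper sequence).toList acc i := by
    intro acc i _
    have hsl : PySem.Str.slice (PySem.Str.upper sequence) (some i) (some (i + 3))
        = String.ofList (PySem.List.slice (PySem.Str.upper sequence).toList (some i) (some (i + 3))) := by
      rw [← PySem.Chars.slice_eq_listSlice, ← PySem.Str.toList_slice]
      exact (String.ofList_toList (s := _)).symm
    simp only [tokStep, PySem.Str.len_eq, hsl, String.toList_ofList]
  rw [PySem.List.foldl_congr_mem _ _ (tokStep (PySem.Str.upper sequence).toList) _ hpt,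
      PySem.Str.len_eq, fold_eq_chunk3]
  simp
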